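-- pv_equiv track=rewrite | github.com/andprogrammer/crackingTheCodingInterview | python/chapter4/8/solution.py | get_common_ancestor
-- ===== SOURCE A (Python) =====
-- def get_common_ancestor(sublist1, sublist2):
--     if not sublist1 or not sublist2:
--         raise Exception('Incorrect data')
--     for x in reversed(sublist2):
--         for y in reversed(sublist1):
--             if x == y:
--                 return x
--     return -9999
-- ===== SOURCE B (Python) =====
-- def get_common_ancestor(sublist1, sublist2):
--     members = set(sublist1)
--     result = -9999
--     for x in sublist2:
--         if x in members:
--             result = x
--     return result
-- ===== Notes on version B (the rewrite author's own statement) =====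
-- stated objective: simpler
-- what changed: Replaces the nested reversed loops with early return by a single forward pass over sublist2 with an overwritten accumulator (last hit wins) testing membership in a set built once from sublist1.
import Mathlib
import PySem

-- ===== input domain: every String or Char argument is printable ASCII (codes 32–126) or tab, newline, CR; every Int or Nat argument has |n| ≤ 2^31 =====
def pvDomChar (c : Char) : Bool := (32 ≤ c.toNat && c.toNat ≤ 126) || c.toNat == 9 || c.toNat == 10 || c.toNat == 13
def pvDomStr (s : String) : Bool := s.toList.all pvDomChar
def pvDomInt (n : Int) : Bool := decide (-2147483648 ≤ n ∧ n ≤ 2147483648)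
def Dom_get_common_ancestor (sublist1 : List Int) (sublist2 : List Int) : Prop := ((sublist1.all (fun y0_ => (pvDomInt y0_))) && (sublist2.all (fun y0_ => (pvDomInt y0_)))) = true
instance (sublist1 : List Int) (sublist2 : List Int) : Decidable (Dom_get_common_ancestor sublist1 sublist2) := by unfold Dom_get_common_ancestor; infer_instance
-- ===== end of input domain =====

-- B replaces A's nested reversed loops with early return by one forward pass over
-- sublist2 with an overwritten accumulator and a precomputed set of sublist1;
-- same sentinel and values (objective: simpler).
-- A raises on an empty list; Pre_ excludes exactly those inputs.

-- ===== PORT A =====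
-- inner loop: 'for y in reversed(sublist1): if x == y: return x' over an already-reversed list
def pvInnerA (x : Int) : List Int → Option Int
  | [] => none
  | y :: ys => if x == y then some x else pvInnerA x ys

-- outer loop: 'for x in reversed(sublist2): …' over an already-reversed list; falls through to -9999
def pvOuterA (sublist1 : List Int) : List Int → Int
  | [] => -9999
  | x :: rest =>
    match pvInnerA x sublist1.reverse with
    | some v => v
    | none => pvOuterA sublist1 rest

def get_common_ancestor (sublist1 : List Int) (sublist2 : List Int) : Int :=
  -- the 'raise Exception' branch (either list empty) is outside Pre_get_common_ancestor
  pvOuterA sublist1 sublist2.reverse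

-- ===== PORT B =====
def get_common_ancestor_alt (sublist1 : List Int) (sublist2 : List Int) : Int :=
  let members : PySem.Set Int := PySem.Set.ofList sublist1
  sublist2.foldl (fun result x => if PySem.Set.contains members x then x else result) (-9999)

-- ===== PRECONDITION & SPEC =====
-- Pre_ excludes exactly the inputs on which A raises Exception('Incorrect data'): an empty list
def Pre_get_common_ancestor (sublist1 : List Int) (sublist2 : List Int) : Prop :=
  sublist1 ≠ [] ∧ sublist2 ≠ []
instance (sublist1 : List Int) (sublist2 : List Int) : Decidable (Pre_get_common_ancestor sublist1 sublist2) := by unfold Pre_get_common_ancestor; infer_instance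

def pvWitness_get_common_ancestor : List Int × List Int := ([1, 2, 3], [4, 2, 5])

def Spec_get_common_ancestor (sublist1 : List Int) (sublist2 : List Int) (out : Int) : Prop := out = get_common_ancestor_alt sublist1 sublist2
instance (sublist1 : List Int) (sublist2 : List Int) (out : Int) : Decidable (Spec_get_common_ancestor sublist1 sublist2 out) := by unfold Spec_get_common_ancestor; infer_instance

-- ===== CLAIM =====
def Claim_equal_get_common_ancestor : Prop := ∀ (sublist1 : List Int) (sublist2 : List Int), Dom_get_common_ancestor sublist1 sublist2 → Pre_get_common_ancestor sublist1 sublist2 → Spec_get_common_ancestor sublist1 sublist2 (get_common_ancestor sublist1 sublist2)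

-- ===== LEMMAS AND PROOFS =====
-- A's inner reversed scan succeeds (with value x) exactly when x occurs in sublist1
theorem pvInnerA_eq_contains (x : Int) (l : List Int) :
    pvInnerA x l = if l.contains x then some x else none := by
  induction l with
  | nil => simp [pvInnerA]
  | cons y ys ih =>
    simp only [pvInnerA, List.contains_cons, ih]
    by_cases h : x = y
    · simp [h]
    · simp [beq_false_of_ne h]

-- step form of the outer loop (the inner scan collapsed to a membership test)
theorem pvOuterA_cons (s1 : List Int) (x : Int) (rest : List Int) :
    pvOuterA s1 (x :: rest) = if s1.contains x then x else pvOuterA s1 rest := by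
  by_cases h : x ∈ s1 <;> simp [pvOuterA, pvInnerA_eq_contains, h]

-- A's reversed outer loop over l equals B's forward fold over l.reverse
theorem pvOuterA_eq_foldl_reverse (s1 l : List Int) :
    pvOuterA s1 l = l.reverse.foldl (fun result x => if s1.contains x then x else result) (-9999) := by
  induction l with
  | nil => rfl
  | cons x rest ih =>
    rw [pvOuterA_cons, List.reverse_cons, List.foldl_append, ih]
    rfl

-- membership in set(sublist1) agrees with membership in sublist1
theorem pySet_contains_eq_list_contains (l : List Int) (x : Int) :
    PySem.Set.contains (PySem.Set.ofList l) x = l.contains x := by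
  simp [PySem.Set.contains_eq_listContains, List.contains_eq_mem, PySem.Set.mem_ofList]

-- ===== VERDICT =====
theorem get_common_ancestor_spec : Claim_equal_get_common_ancestor := by
  intro s1 s2 _ _
  unfold Spec_get_common_ancestor get_common_ancestor get_common_ancestor_alt
  rw [pvOuterA_eq_foldl_reverse, List.reverse_reverse]
  simp only [pySet_contains_eq_list_contains]
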